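-- pv_equiv track=rewrite | github.com/tikalk/agentic-sdlc-spec-kit | src/specify_cli/integrations/vibe/__init__.py | _inject_frontmatter_flag
-- ===== SOURCE A (Python) =====
-- def _inject_frontmatter_flag(content: str, key: str, value: str = "true") -> str:
--     """
--     Insert ``key: value`` before the closing ``---`` if not already present.
--     Value: true by default
--     """
--     lines = content.splitlines(keepends=True)
--
--     # Pre-scan: bail out if already present in frontmatter
--     dash_count = 0
--     for line in lines:
--         stripped = line.rstrip("\n\r")
--         if stripped == "---":
--             dash_count += 1
--             if dash_count == 2:
--                 break
--             continue
--         if dash_count == 1 and stripped.startswith(f"{key}:"):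
--             return content
--
--     # Inject before the closing --- of frontmatter
--     out: list[str] = []
--     dash_count = 0
--     injected = False
--     for line in lines:
--         stripped = line.rstrip("\n\r")
--         if stripped == "---":
--             dash_count += 1
--             if dash_count == 2 and not injected:
--                 if line.endswith("\r\n"):
--                     eol = "\r\n"
--                 elif line.endswith("\n"):
--                     eol = "\n"
--                 else:
--                     eol = ""
--                 out.append(f"{key}: {value}{eol}")
--                 injected = True
--         out.append(line)
--     return "".join(out)
-- ===== SOURCE B (Python) =====
-- def _inject_frontmatter_flag(content: str, key: str, value: str = "true") -> str:
--     """Single pass: build the output while scanning; bail out the moment the key is seen."""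
--     out = []
--     dash_count = 0
--     for line in content.splitlines(keepends=True):
--         stripped = line.rstrip("\n\r")
--         if stripped == "---":
--             if dash_count == 1:
--                 if line.endswith("\r\n"):
--                     eol = "\r\n"
--                 elif line.endswith("\n"):
--                     eol = "\n"
--                 else:
--                     eol = ""
--                 out.append(f"{key}: {value}{eol}")
--             dash_count += 1
--         elif dash_count == 1 and stripped.startswith(f"{key}:"):
--             return content
--         out.append(line)
--     return "".join(out)
-- ===== Notes on version B (the rewrite author's own statement) =====
-- stated objective: simpler
-- what changed: Replaces A's two passes over the lines (a pre-scan for the key, then a rebuild loop with an 'injected' flag) by a single pass that builds the output while scanning, returns content the moment the key is found in the frontmatter, and injects exactly when the dash counter goes from 1 to 2 (no flag needed).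
import Mathlib
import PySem

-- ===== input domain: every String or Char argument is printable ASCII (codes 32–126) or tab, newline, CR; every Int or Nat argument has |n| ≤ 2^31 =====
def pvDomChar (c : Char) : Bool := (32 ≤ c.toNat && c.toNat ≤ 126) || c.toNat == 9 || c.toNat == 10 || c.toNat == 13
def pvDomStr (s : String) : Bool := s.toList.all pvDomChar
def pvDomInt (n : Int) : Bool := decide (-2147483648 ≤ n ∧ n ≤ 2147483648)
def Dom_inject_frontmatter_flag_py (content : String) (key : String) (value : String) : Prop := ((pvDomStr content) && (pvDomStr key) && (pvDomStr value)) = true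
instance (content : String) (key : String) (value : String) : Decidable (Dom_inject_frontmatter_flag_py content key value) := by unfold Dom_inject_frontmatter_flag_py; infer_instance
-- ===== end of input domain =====

-- B folds A's two passes into ONE pass without the 'injected' flag; same output, same cost (objective: simpler).

-- shared primitives (both Pythons call splitlines(keepends=True), rstrip("\n\r"), endswith):
-- splitlines(keepends=True): exact on the Dom charset, whose only line breaks are '\n', '\r', '\r\n'
def splitKeep : List Char → List (List Char)
  | [] => []
  | '\n' :: cs => ['\n'] :: splitKeep cs
  | '\r' :: '\n' :: cs => ['\r', '\n'] :: splitKeep cs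
  | '\r' :: cs => ['\r'] :: splitKeep cs
  | c :: cs =>
    match splitKeep cs with
    | [] => [[c]]
    | l :: ls => (c :: l) :: ls

-- line.rstrip("\n\r"): exact
def rstripNL (cs : List Char) : List Char :=
  (cs.reverse.dropWhile (fun c => c == '\n' || c == '\r')).reverse

-- the eol choice (line.endswith("\r\n") / ("\n")): exact
def eolOf (l : List Char) : List Char :=
  if ['\r', '\n'].isSuffixOf l then ['\r', '\n']
  else if ['\n'].isSuffixOf l then ['\n']
  else []

-- ===== PORT A =====
-- A's first loop: bail out if key already present in frontmatter
def aPreScan (key : List Char) : List (List Char) → Nat → Bool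
  | [], _ => false
  | l :: ls, dc =>
    let st := rstripNL l
    if st = ['-', '-', '-'] then
      if dc + 1 == 2 then false else aPreScan key ls (dc + 1)
    else if dc == 1 && (key ++ [':']).isPrefixOf st then true
    else aPreScan key ls dc

-- A's second loop: rebuild, injecting once before the second '---'
def aBuild (key value : List Char) : List (List Char) → Nat → Bool → List (List Char)
  | [], _, _ => []
  | l :: ls, dc, inj =>
    if rstripNL l = ['-', '-', '-'] then
      if (dc + 1 == 2) && !inj then
        (key ++ ':' :: ' ' :: value ++ eolOf l) :: l :: aBuild key value ls (dc + 1) true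
      else l :: aBuild key value ls (dc + 1) inj
    else l :: aBuild key value ls dc inj

def inject_frontmatter_flag_py (content : String) (key : String) (value : String) : String :=
  let lines := splitKeep content.toList
  if aPreScan key.toList lines 0 then content
  else String.ofList (aBuild key.toList value.toList lines 0 false).flatten

-- ===== PORT B =====
-- B's single loop: accumulate output; none = early 'return content'
def bLoop (key value : List Char) : List (List Char) → Nat → List Char → Option (List Char)
  | [], _, acc => some acc
  | l :: ls, dc, acc =>
    if rstripNL l = ['-', '-', '-'] then
      if dc == 1 then
        bLoop key value ls (dc + 1) (acc ++ (key ++ ':' :: ' ' :: value ++ eolOf l) ++ l)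
      else bLoop key value ls (dc + 1) (acc ++ l)
    else if dc == 1 && (key ++ [':']).isPrefixOf (rstripNL l) then none
    else bLoop key value ls dc (acc ++ l)

def inject_frontmatter_flag_py_alt (content : String) (key : String) (value : String) : String :=
  match bLoop key.toList value.toList (splitKeep content.toList) 0 [] with
  | none => content
  | some cs => String.ofList cs

-- ===== PRECONDITION & SPEC =====
def Spec_inject_frontmatter_flag_py (content : String) (key : String) (value : String) (out : String) : Prop := out = inject_frontmatter_flag_py_alt content key value
instance (content : String) (key : String) (value : String) (out : String) : Decidable (Spec_inject_frontmatter_flag_py content key value out) := by unfold Spec_inject_frontmatter_flag_py; infer_instance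

-- ===== CLAIM (what is proved, stated in full; the proofs are below) =====
def Claim_equal_inject_frontmatter_flag_py : Prop := ∀ (content : String) (key : String) (value : String), Dom_inject_frontmatter_flag_py content key value → Spec_inject_frontmatter_flag_py content key value (inject_frontmatter_flag_py content key value)

-- ===== LEMMAS AND PROOFS =====

-- past the second delimiter B only appends
theorem bLoop_ge_two (key value : List Char) (ls : List (List Char)) :
    ∀ (dc : Nat) (acc : List Char), 2 ≤ dc →
      bLoop key value ls dc acc = some (acc ++ ls.flatten) := by
  induction ls with
  | nil => intro dc acc _; simp [bLoop]
  | cons l ls ih =>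
    intro dc acc h
    have hne : (dc == 1) = false := by simp; omega
    by_cases hd : rstripNL l = ['-', '-', '-']
    · simp [bLoop, hd, hne]
      rw [ih (dc + 1) (acc ++ l) (by omega)]
      simp [List.append_assoc]
    · simp [bLoop, hd, hne]
      rw [ih dc (acc ++ l) h]
      simp [List.append_assoc]

-- once injected, A's rebuild only appends
theorem aBuild_injected (key value : List Char) (ls : List (List Char)) :
    ∀ (dc : Nat), aBuild key value ls dc true = ls := by
  induction ls with
  | nil => intro dc; simp [aBuild]
  | cons l ls ih =>
    intro dc
    by_cases hd : rstripNL l = ['-', '-', '-'] <;> simp [aBuild, hd, ih]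

-- main invariant: for dc ≤ 1, B's single pass equals A's pre-scan + rebuild
theorem bLoop_eq (key value : List Char) (ls : List (List Char)) :
    ∀ (dc : Nat) (acc : List Char), dc ≤ 1 →
      bLoop key value ls dc acc =
        if aPreScan key ls dc then none
        else some (acc ++ (aBuild key value ls dc false).flatten) := by
  induction ls with
  | nil => intro dc acc _; simp [bLoop, aPreScan, aBuild]
  | cons l ls ih =>
    intro dc acc hdc
    by_cases hd : rstripNL l = ['-', '-', '-']
    · by_cases h1 : dc = 1
      · subst h1
        simp [bLoop, aPreScan, aBuild, hd, bLoop_ge_two, aBuild_injected,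
          List.append_assoc]
      · have h0 : dc = 0 := by omega
        subst h0
        simp [bLoop, aPreScan, aBuild, hd]
        rw [ih 1 (acc ++ l) (by omega)]
        split <;> simp [List.append_assoc]
    · by_cases h1 : dc = 1
      · subst h1
        by_cases hk : (key ++ [':']).isPrefixOf (rstripNL l)
        · simp [bLoop, aPreScan, hd, hk]
        · simp [bLoop, aPreScan, aBuild, hd, hk]
          rw [ih 1 (acc ++ l) (by omega)]
          split <;> simp [List.append_assoc]
      · have h0 : dc = 0 := by omega
        subst h0
        simp [bLoop, aPreScan, aBuild, hd]
        rw [ih 0 (acc ++ l) (by omega)]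
        split <;> simp [List.append_assoc]

-- ===== VERDICT (by name: the statement is the Claim_ definition above) =====
theorem inject_frontmatter_flag_py_spec : Claim_equal_inject_frontmatter_flag_py := by
  intro content key value _
  unfold Spec_inject_frontmatter_flag_py inject_frontmatter_flag_py inject_frontmatter_flag_py_alt
  rw [bLoop_eq key.toList value.toList (splitKeep content.toList) 0 [] (by omega)]
  by_cases h : aPreScan key.toList (splitKeep content.toList) 0 <;> simp [h]
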